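-- pv_equiv track=rewrite | github.com/parthtiwari1/prompt-injection-capstone | mitigations/spotlighting.py | datamark_input
-- ===== SOURCE A (Python) =====
-- def datamark_input(user_message):
--     """
--     Inserts special datamarking tokens every few words.
--     This helps the model recognise user content as data, not instructions.
--     """
--     words = user_message.split()
--     marked_words = []
--     for i, word in enumerate(words):
--         marked_words.append(word)
--         # Insert marker every 15 words
--         if (i + 1) % 15 == 0 and i < len(words) - 1:
--             marked_words.append("[DATA]")
--     return " ".join(marked_words)
-- ===== SOURCE B (Python) =====
-- def datamark_input(user_message):
--     words = user_message.split()
--     chunks = []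
--     while words:
--         chunks.append(" ".join(words[:15]))
--         words = words[15:]
--     return " [DATA] ".join(chunks)
-- ===== Notes on version B (the rewrite author's own statement) =====
-- stated objective: simpler
-- what changed: Replaced the counter-driven per-word loop with its (i+1)%15 modulo test and last-word guard by partitioning the word list into 15-word chunks and joining the chunk strings with ' [DATA] '; the suppressed trailing marker falls out of between-chunks joining.
import Mathlib
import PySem

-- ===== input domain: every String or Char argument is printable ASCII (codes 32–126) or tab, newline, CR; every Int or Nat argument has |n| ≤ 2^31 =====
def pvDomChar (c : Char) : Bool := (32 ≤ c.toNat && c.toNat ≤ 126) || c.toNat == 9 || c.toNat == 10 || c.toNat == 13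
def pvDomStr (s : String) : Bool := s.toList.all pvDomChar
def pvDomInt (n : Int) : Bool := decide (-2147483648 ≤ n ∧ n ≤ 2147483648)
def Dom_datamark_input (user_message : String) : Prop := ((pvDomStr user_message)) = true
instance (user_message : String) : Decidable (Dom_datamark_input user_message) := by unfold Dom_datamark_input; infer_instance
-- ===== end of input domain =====

-- B replaces A's counter-driven loop (marker when (i+1)%15==0 and i is not last) by
-- partitioning the word list into 15-word chunks and joining them with " [DATA] " (simpler decomposition).

-- ===== PORT A =====
def datamark_input (user_message : String) : String :=
  let words := PySem.Str.split₀ user_message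
  let marked_words := (PySem.List.enumerate words 0).foldl
    (fun acc p =>
      let acc2 := acc ++ [p.2]
      if PySem.Int.mod (p.1 + 1) 15 = 0 ∧ p.1 < PySem.List.len words - 1 then
        acc2 ++ ["[DATA]"]
      else acc2)
    []
  PySem.Str.join " " marked_words

-- ===== PORT B =====
-- the while-loop of Source B: pop a 15-word chunk per iteration (words[:15] / words[15:])
def pvChunkJoin (words : List String) : List String :=
  if h : words = [] then []
  else
    PySem.Str.join " " (PySem.List.slice words none (some 15)) ::
      pvChunkJoin (PySem.List.slice words (some 15) none)
termination_by words.length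
decreasing_by
  have hs : PySem.List.slice words (some 15) none = words.drop 15 := by
    rw [PySem.List.slice_from words (by norm_num)]; congr 1
  rw [hs]
  have := List.length_pos_iff.mpr h
  simp only [List.length_drop]
  omega

def datamark_input_alt (user_message : String) : String :=
  PySem.Str.join " [DATA] " (pvChunkJoin (PySem.Str.split₀ user_message))

-- ===== PRECONDITION & SPEC =====
def Spec_datamark_input (user_message : String) (out : String) : Prop := out = datamark_input_alt user_message
instance (user_message : String) (out : String) : Decidable (Spec_datamark_input user_message out) := by unfold Spec_datamark_input; infer_instance

-- ===== CLAIM (what is proved, stated in full; the proofs are below) =====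
def Claim_equal_datamark_input : Prop := ∀ (user_message : String), Dom_datamark_input user_message → Spec_datamark_input user_message (datamark_input user_message)

-- ===== LEMMAS AND PROOFS =====

-- what A's loop builds: each word, followed by "[DATA]" exactly when its index i satisfies the guard
def pvG (L : Int) : List String → Int → List String
  | [], _ => []
  | w :: t, s =>
    if PySem.Int.mod (s + 1) 15 = 0 ∧ s < L - 1 then w :: "[DATA]" :: pvG L t (s + 1)
    else w :: pvG L t (s + 1)

lemma pvFoldA (L : Int) : ∀ (t : List String) (s : Int) (acc : List String),
    (PySem.List.enumerate t s).foldl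
      (fun acc p =>
        let acc2 := acc ++ [p.2]
        if PySem.Int.mod (p.1 + 1) 15 = 0 ∧ p.1 < L - 1 then acc2 ++ ["[DATA]"] else acc2)
      acc = acc ++ pvG L t s := by
  intro t
  induction t with
  | nil => intro s acc; simp [PySem.List.enumerate, pvG]
  | cons w t ih =>
      intro s acc
      rw [PySem.List.enumerate_cons, List.foldl_cons, ih]
      simp only [pvG]
      split_ifs with h <;> simp

lemma pvG_append (L : Int) : ∀ (a b : List String) (s : Int),
    pvG L (a ++ b) s = pvG L a s ++ pvG L b (s + a.length) := by
  intro a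
  induction a with
  | nil => intro b s; simp [pvG]
  | cons w t ih =>
      intro b s
      simp only [List.cons_append, pvG, ih]
      split_ifs with h <;> simp <;> ring_nf

lemma pvG_shift (L : Int) : ∀ (t : List String) (s : Int),
    pvG L t (s + 15) = pvG (L - 15) t s := by
  intro t
  induction t with
  | nil => intro s; simp [pvG]
  | cons w t ih =>
      intro s
      have hm : PySem.Int.mod (s + 15 + 1) 15 = PySem.Int.mod (s + 1) 15 := by
        simp only [PySem.Int.mod, Int.fmod_eq_emod]
        omega
      have hb : (s + 15 < L - 1) ↔ (s < L - 15 - 1) := by omega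
      have h15 : s + 15 + 1 = s + 1 + 15 := by ring
      simp only [pvG, hm, hb]
      rw [h15, ih]

lemma pvG_small (L : Int) : ∀ (t : List String) (s : Int),
    0 ≤ s → s + (t.length : Int) ≤ L → L ≤ 15 → pvG L t s = t := by
  intro t
  induction t with
  | nil => intro s _ _ _; simp [pvG]
  | cons w t ih =>
      intro s h0 hle h15
      simp only [List.length_cons] at hle
      have hc : ¬ (PySem.Int.mod (s + 1) 15 = 0 ∧ s < L - 1) := by
        rintro ⟨h1, h2⟩
        simp only [PySem.Int.mod, Int.fmod_eq_emod] at h1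
        omega
      simp only [pvG, hc, if_false]
      rw [ih (s + 1) (by omega) (by omega) h15]

lemma pvG_chunk (L : Int) : ∀ (t : List String) (s : Int),
    t ≠ [] → 0 ≤ s → s + (t.length : Int) = 15 → 15 < L →
    pvG L t s = t ++ ["[DATA]"] := by
  intro t
  induction t with
  | nil => intro s h; exact absurd rfl h
  | cons w t ih =>
      intro s _ h0 hlen h15
      simp only [List.length_cons] at hlen
      by_cases ht : t = []
      · subst ht
        simp only [List.length_nil] at hlen
        have hs : s = 14 := by omega
        subst hs
        have hc : PySem.Int.mod (14 + 1) 15 = 0 ∧ (14:Int) < L - 1 := by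
          constructor
          · decide
          · omega
        simp [pvG, hc]
      · have hc : ¬ (PySem.Int.mod (s + 1) 15 = 0 ∧ s < L - 1) := by
          rintro ⟨h1, _⟩
          have htl : 0 < (t.length : Int) := by
            have := List.length_pos_iff.mpr ht
            exact_mod_cast this
          simp only [PySem.Int.mod, Int.fmod_eq_emod] at h1
          omega
        simp only [pvG, hc, if_false]
        rw [ih (s + 1) ht (by omega) (by push_cast at hlen ⊢; omega) h15]
        simp

lemma pvG_ne_nil (L : Int) (t : List String) (s : Int) (h : t ≠ []) : pvG L t s ≠ [] := by
  obtain ⟨w, t', rfl⟩ := List.exists_cons_of_ne_nil h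
  simp only [pvG]
  split_ifs <;> simp

lemma pvChunkJoin_nil : pvChunkJoin [] = [] := by unfold pvChunkJoin; simp

lemma pvChunkJoin_cons (ws : List String) (h : ws ≠ []) :
    pvChunkJoin ws = PySem.Str.join " " (ws.take 15) :: pvChunkJoin (ws.drop 15) := by
  conv_lhs => rw [pvChunkJoin.eq_def]
  rw [dif_neg h, PySem.List.slice_to ws (by norm_num), PySem.List.slice_from ws (by norm_num)]
  congr 1

lemma pvChunkJoin_ne_nil (ws : List String) (h : ws ≠ []) : pvChunkJoin ws ≠ [] := by
  rw [pvChunkJoin_cons ws h]; simp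

lemma pvJoin_append (sep : List Char) : ∀ (xs ys : List (List Char)), xs ≠ [] → ys ≠ [] →
    PySem.Chars.join sep (xs ++ ys) = PySem.Chars.join sep xs ++ sep ++ PySem.Chars.join sep ys := by
  intro xs
  induction xs with
  | nil => intro ys h; exact absurd rfl h
  | cons p xs ih =>
      intro ys _ hy
      by_cases hx : xs = []
      · subst hx
        obtain ⟨q, r, rfl⟩ := List.exists_cons_of_ne_nil hy
        rw [List.singleton_append, PySem.Chars.join_cons_cons, PySem.Chars.join_singleton]
      · obtain ⟨p2, t, rfl⟩ := List.exists_cons_of_ne_nil hx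
        have h2 := ih ys (List.cons_ne_nil _ _) hy
        simp only [List.cons_append] at h2 ⊢
        rw [PySem.Chars.join_cons_cons, h2, PySem.Chars.join_cons_cons]
        simp [List.append_assoc]

lemma pvJoin_cons (sep : List Char) (x : List Char) (rest : List (List Char)) (h : rest ≠ []) :
    PySem.Chars.join sep (x :: rest) = x ++ sep ++ PySem.Chars.join sep rest := by
  obtain ⟨q, r, rfl⟩ := List.exists_cons_of_ne_nil h
  rw [PySem.Chars.join_cons_cons]

lemma pvMain : ∀ (n : Nat) (ws : List String), ws.length = n →
    PySem.Str.join " " (pvG (ws.length : Int) ws 0) = PySem.Str.join " [DATA] " (pvChunkJoin ws) := by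
  intro n
  induction n using Nat.strong_induction_on with
  | _ n IH =>
    intro ws hn
    by_cases h0 : ws = []
    · subst h0
      rw [pvChunkJoin_nil, ← String.toList_inj]
      simp [PySem.Str.toList_join, pvG, PySem.Chars.join_nil]
    · by_cases h15 : ws.length ≤ 15
      · rw [pvG_small _ ws 0 le_rfl (by omega) (by exact_mod_cast h15)]
        rw [pvChunkJoin_cons ws h0]
        have hd : ws.drop 15 = [] := List.drop_eq_nil_iff.mpr h15
        rw [hd, pvChunkJoin_nil, List.take_of_length_le h15, ← String.toList_inj]
        simp [PySem.Str.toList_join, PySem.Chars.join_singleton]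
      · -- more than 15 words: first chunk, marker, rest
        rw [not_le] at h15
        have htake : (ws.take 15).length = 15 := by simp; omega
        have htake0 : ws.take 15 ≠ [] := by
          intro h; rw [h] at htake; simp at htake
        have hdropne : ws.drop 15 ≠ [] := by
          intro h
          have := List.drop_eq_nil_iff.mp h
          omega
        have hL : (ws.length : Int) - 15 = ((ws.drop 15).length : Int) := by
          simp [List.length_drop]; omega
        have hGdecomp : pvG (ws.length : Int) ws 0 =
            (ws.take 15 ++ ["[DATA]"]) ++ pvG ((ws.drop 15).length : Int) (ws.drop 15) 0 := by
          have hsplit := pvG_append (ws.length : Int) (ws.take 15) (ws.drop 15) 0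
          rw [List.take_append_drop] at hsplit
          rw [hsplit]
          rw [pvG_chunk (ws.length : Int) (ws.take 15) 0 htake0 le_rfl
            (by rw [htake]; norm_num) (by exact_mod_cast h15)]
          congr 1
          rw [htake]
          have h015 : (0 : Int) + (15 : Nat) = 0 + 15 := by norm_num
          rw [h015, pvG_shift, hL]
        rw [hGdecomp, pvChunkJoin_cons ws h0, ← String.toList_inj,
            PySem.Str.toList_join, PySem.Str.toList_join]
        simp only [List.map_append, List.map_cons, List.map_nil]
        rw [pvJoin_append (" " : String).toList _ _
            (by simp) (by simp [pvG_ne_nil _ _ _ hdropne])]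
        rw [pvJoin_append (" " : String).toList _ _
            (by simpa using h0) (by simp)]
        rw [PySem.Chars.join_singleton]
        rw [pvJoin_cons _ _ _ (by
          intro h
          exact pvChunkJoin_ne_nil _ hdropne (List.map_eq_nil_iff.mp h))]
        have hIH := IH (ws.drop 15).length (by rw [← hn]; simp [List.length_drop]; omega)
          (ws.drop 15) rfl
        have hIH' := congrArg String.toList hIH
        rw [PySem.Str.toList_join, PySem.Str.toList_join] at hIH'
        rw [hIH', PySem.Str.toList_join]
        have hsep : (" [DATA] " : String).toList =
            (" " : String).toList ++ ("[DATA]" : String).toList ++ (" " : String).toList := by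
          decide
        rw [hsep]
        simp [List.append_assoc]

-- ===== VERDICT (by name: the statement is the Claim_ definition above) =====
theorem datamark_input_spec : Claim_equal_datamark_input := by
  intro u _
  unfold Spec_datamark_input datamark_input datamark_input_alt
  simp only []
  rw [pvFoldA (PySem.List.len (PySem.Str.split₀ u))]
  simp only [List.nil_append, PySem.List.len_eq]
  exact pvMain (PySem.Str.split₀ u).length _ rfl
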